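-- pv_equiv track=rewrite | github.com/ghazalbn/Competitive-Programming | Contests/13/D.py | check
-- ===== SOURCE A (Python) =====
-- def check(n, m):
--     if n == m:
--         return "YES"
--     for i in range(1, (n // 2) + 1):
--         if n == i + (i * 2):
--             if i == m or (i * 2) == m:
--                 return "YES"
--             if check(i, m) == "NO":
--                 return check(i * 2, m)
--             else:
--                 return "YES"
--     return "NO"
-- ===== SOURCE B (Python) =====
-- def check(n, m):
--     def reachable(v):
--         if v == m:
--             return True
--         if v % 3 == 0 and v // 3 >= 1:
--             q = v // 3
--             return reachable(q) or reachable(2 * q)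
--         return False
--     return "YES" if reachable(n) else "NO"
-- ===== Notes on version B (the rewrite author's own statement) =====
-- stated objective: faster
-- what changed: B replaces A's O(n) linear scan for the split point (searching all i in range(1, n//2+1) for n == 3*i) with the direct divisibility test n % 3 == 0 and i = n // 3, and uses a boolean helper instead of A's string-comparison control flow.
import Mathlib
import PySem

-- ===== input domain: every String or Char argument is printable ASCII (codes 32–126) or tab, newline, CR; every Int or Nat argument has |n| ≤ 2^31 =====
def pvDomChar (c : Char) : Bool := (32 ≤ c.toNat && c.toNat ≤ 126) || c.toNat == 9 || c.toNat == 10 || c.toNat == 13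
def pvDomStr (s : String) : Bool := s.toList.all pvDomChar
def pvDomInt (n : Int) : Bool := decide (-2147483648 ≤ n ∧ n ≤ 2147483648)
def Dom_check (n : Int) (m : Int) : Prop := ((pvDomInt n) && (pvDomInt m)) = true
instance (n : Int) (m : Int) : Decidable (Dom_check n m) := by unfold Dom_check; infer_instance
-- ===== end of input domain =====

-- B replaces A's O(n) scan for the split point with the direct test n % 3 == 0, i = n // 3; faster (asymptotic per call).

-- ===== PORT A =====
-- A's recursion, made total with a fuel counter (n.toNat + 1 always suffices: each
-- recursive call strictly decreases a positive n); the for-loop is checkLoopA.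
mutual
def checkFuelA : Nat → Int → Int → String
  | 0, _, _ => "NO"
  | f+1, n, m =>
    if n = m then "YES"
    else checkLoopA f n m (PySem.List.pyRange 1 (PySem.Int.floordiv n 2 + 1) 1)
  termination_by f _ _ => (f, 0)

def checkLoopA : Nat → Int → Int → List Int → String
  | _, _, _, [] => "NO"
  | f, n, m, i :: rest =>
    if n = i + i * 2 then
      if i = m ∨ i * 2 = m then "YES"
      else if checkFuelA f i m = "NO" then checkFuelA f (i * 2) m
      else "YES"
    else checkLoopA f n m rest
  termination_by f _ _ l => (f, l.length + 1)
end

def check (n : Int) (m : Int) : String := checkFuelA (n.toNat + 1) n m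

-- ===== PORT B =====
-- B's boolean helper `reachable`, made total with the same fuel guard
-- (recursion only happens for v ≥ 3, and both children are < v and ≥ 1).
def reachCk : Nat → Int → Int → Bool
  | 0, _, _ => false
  | f+1, m, v =>
    if v = m then true
    else if PySem.Int.mod v 3 = 0 ∧ PySem.Int.floordiv v 3 ≥ 1 then
      reachCk f m (PySem.Int.floordiv v 3) || reachCk f m (2 * PySem.Int.floordiv v 3)
    else false

def check_alt (n : Int) (m : Int) : String :=
  if reachCk (n.toNat + 1) m n then "YES" else "NO"

-- ===== PRECONDITION & SPEC =====
def Spec_check (n : Int) (m : Int) (out : String) : Prop := out = check_alt n m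
instance (n : Int) (m : Int) (out : String) : Decidable (Spec_check n m out) := by unfold Spec_check; infer_instance

-- ===== CLAIM (what is proved, stated in full; the proofs are below) =====
def Claim_equal_check : Prop := ∀ (n : Int) (m : Int), Dom_check n m → Spec_check n m (check n m)

-- ===== LEMMAS AND PROOFS =====

lemma reachCk_self (f : Nat) (hf : 1 ≤ f) (m : Int) : reachCk f m m = true := by
  cases f with
  | zero => omega
  | succ f => simp [reachCk]

-- A's for-loop returns "NO" unless the unique split point n/3 is in the scanned list.
lemma checkLoopA_char (f : Nat) (n m : Int) (l : List Int) :
    checkLoopA f n m l =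
      if n = 3 * (n / 3) ∧ (n / 3) ∈ l then
        (if n / 3 = m ∨ (n / 3) * 2 = m then "YES"
         else if checkFuelA f (n / 3) m = "NO" then checkFuelA f ((n / 3) * 2) m
         else "YES")
      else "NO" := by
  induction l with
  | nil => simp [checkLoopA]
  | cons i rest ih =>
    rw [checkLoopA]
    by_cases h : n = i + i * 2
    · have hi : n / 3 = i := by omega
      have hd : n = 3 * (n / 3) := by omega
      rw [if_pos h, hi]
      have hcnd : n = 3 * i ∧ i ∈ i :: rest := ⟨by omega, List.mem_cons_self ..⟩
      rw [if_pos hcnd]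
    · rw [if_neg h, ih]
      by_cases hd : n = 3 * (n / 3)
      · have hne : n / 3 ≠ i := by omega
        simp only [List.mem_cons, hne, false_or]
      · rw [if_neg (by tauto), if_neg (by tauto)]

-- Main invariant: with sufficient fuel, A's port computes exactly B's boolean.
lemma main_eq (f : Nat) : ∀ (n m : Int), n.toNat < f →
    checkFuelA f n m = (if reachCk f m n then "YES" else "NO") := by
  induction f with
  | zero => intro n m h; omega
  | succ f ih =>
    intro n m _hn
    rw [checkFuelA, reachCk]
    by_cases hm : n = m
    · simp [hm]
    · simp only [hm, if_false]
      rw [checkLoopA_char]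
      rw [PySem.Int.floordiv_eq_ediv_of_pos (a := n) (b := 2) (by omega)]
      rw [PySem.Int.floordiv_eq_ediv_of_pos (a := n) (b := 3) (by omega)]
      rw [PySem.Int.mod_eq_emod_of_pos (a := n) (b := 3) (by omega)]
      by_cases hc : n % 3 = 0 ∧ n / 3 ≥ 1
      · have hd : n = 3 * (n / 3) := by omega
        have hmem : (n / 3) ∈ PySem.List.pyRange 1 (n / 2 + 1) 1 := by
          rw [PySem.List.mem_pyRange_one]; omega
        have hn3 : 3 ≤ n := by omega
        have hf1 : 1 ≤ f := by omega
        have h1 : (n / 3).toNat < f := by omega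
        have h2 : ((n / 3) * 2).toNat < f := by omega
        rw [if_pos ⟨hd, hmem⟩, if_pos hc]
        by_cases he1 : n / 3 = m
        · rw [if_pos (Or.inl he1), he1, reachCk_self f hf1 m]
          simp
        · by_cases he2 : (n / 3) * 2 = m
          · rw [if_pos (Or.inr he2)]
            have : 2 * (n / 3) = m := by omega
            rw [this, reachCk_self f hf1 m]
            simp
          · rw [if_neg (by tauto)]
            rw [ih (n / 3) m h1, ih ((n / 3) * 2) m h2]
            have hcomm : (n / 3) * 2 = 2 * (n / 3) := by ring
            rw [hcomm]
            by_cases b1 : reachCk f m (n / 3) <;>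
              by_cases b2 : reachCk f m (2 * (n / 3)) <;>
                simp [b1, b2]
      · rw [if_neg hc, if_neg (by rw [PySem.List.mem_pyRange_one]; omega :
          ¬ (n = 3 * (n / 3) ∧ (n / 3) ∈ PySem.List.pyRange 1 (n / 2 + 1) 1))]
        simp

-- ===== VERDICT (by name: the statement is the Claim_ definition above) =====
theorem check_spec : Claim_equal_check := by
  intro n m _hd
  unfold Spec_check check check_alt
  exact main_eq (n.toNat + 1) n m (by omega)
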